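-- pv_equiv track=rewrite | github.com/radoslawrolka/Introduction_to_Computer_Science_Course | zestaw_3/z4_d.py | zad4
-- ===== SOURCE A (Python) =====
-- def long_div(a, b, tab):
--     for i in range(1, len(tab)):
--         a *= 10
--         tab[i] += a//b
--         a %= b
--         if a == 0:
--             return
--
-- def zad4(n):
--     digits = [1]+[0]*(n+10)
--     fact = 1
--     k = 1
--     while fact <= 10**n:
--         fact *= k
--         k += 1
--         long_div(1, fact, digits)
--     for i in range(len(digits)-1, 0, -1):
--         digits[i-1] += digits[i]//10
--         digits[i] %= 10
--     return digits[:n+1]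
-- ===== SOURCE B (Python) =====
-- def zad4(n):
--     if n < 0:
--         return []
--     p = n + 10
--     pow_p = 10 ** p
--     limit = 10 ** n
--     total = pow_p
--     fact = 1
--     k = 1
--     while fact <= limit:
--         fact *= k
--         k += 1
--         total += pow_p // fact
--     digits = []
--     while total > 0:
--         total, d = divmod(total, 10)
--         digits.append(d)
--     digits.reverse()
--     return digits[:n + 1]
-- ===== Notes on version B (the rewrite author's own statement) =====
-- stated objective: faster
-- what changed: Per series term B does one big-integer floor division 10^(n+10)//k! added into a single integer accumulator instead of A's digit-by-digit long division into an (n+11)-slot array, and extracts the decimal digits once by divmod at the end instead of A's final carry-propagation pass.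
-- intended difference: For -5 <= n <= -2 (nonsensical negative digit counts) A returns a nonempty truncated prefix of its zero-padded buffer, an accident of negative slicing, while B returns the empty list, the intended value for a negative count; on every other n they agree. — e.g. on zad4(-2): A returns [1, 0, 0, 0, 0, 0, 0, 0], B returns []
import Mathlib
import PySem

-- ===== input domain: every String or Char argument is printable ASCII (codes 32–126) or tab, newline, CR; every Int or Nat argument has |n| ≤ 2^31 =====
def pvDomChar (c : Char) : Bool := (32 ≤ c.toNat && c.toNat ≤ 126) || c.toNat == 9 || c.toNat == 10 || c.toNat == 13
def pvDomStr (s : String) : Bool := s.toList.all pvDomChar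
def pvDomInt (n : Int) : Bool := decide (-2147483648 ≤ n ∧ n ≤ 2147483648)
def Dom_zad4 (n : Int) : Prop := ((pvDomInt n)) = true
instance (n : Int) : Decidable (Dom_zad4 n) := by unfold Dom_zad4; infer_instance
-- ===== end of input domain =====

-- B replaces A's per-term digit-array long division and final carry pass by one big-integer
-- floor division per term summed into a single integer whose digits are extracted once (faster).

-- ===== PORT A =====
-- long_div(a, b, tab): loop over the indices 1..len(tab)-1 (fuel = how many remain), early
-- return when the remainder hits 0
def longDivAux (a b : Int) (tab : List Int) (i : Nat) : Nat → List Int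
  | 0 => tab
  | fuel + 1 =>
    let a1 := a * 10
    let tab1 := tab.set i (tab[i]! + PySem.Int.floordiv a1 b)
    let a2 := PySem.Int.mod a1 b
    if a2 = 0 then tab1 else longDivAux a2 b tab1 (i + 1) fuel

def longDiv (a b : Int) (tab : List Int) : List Int := longDivAux a b tab 1 (tab.length - 1)

-- the while loop of zad4; fuel is a totality guard only: fact ≥ k-1 on every reachable
-- state, so the guard fails before k exceeds limit+2 and the fuel below never runs out
def zad4Loop : Nat → Int → Int → Int → List Int → List Int
  | 0, _, _, _, digits => digits
  | fuel + 1, limit, fact, k, digits =>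
    if fact ≤ limit then
      zad4Loop fuel limit (fact * k) (k + 1) (longDiv 1 (fact * k) digits)
    else digits

-- for i in range(len(digits)-1, 0, -1): carry propagation
def carryAux (digits : List Int) (i : Nat) : List Int :=
  match i with
  | 0 => digits
  | j + 1 =>
    let d := digits[j + 1]!
    let digits1 := (digits.set j (digits[j]! + PySem.Int.floordiv d 10)).set (j + 1)
        (PySem.Int.mod d 10)
    carryAux digits1 j

def zad4 (n : Int) : List Int :=
  let digits0 : List Int := 1 :: List.replicate (n + 10).toNat 0
  -- Python's guard is 'fact <= 10**n'; for n < 0, 10**n is a float below 1 ≤ fact, so the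
  -- loop body never runs: the 'if 0 ≤ n' renders exactly that comparison
  let digits1 := if 0 ≤ n then
      zad4Loop ((10 : Int) ^ n.toNat + 2).toNat ((10 : Int) ^ n.toNat) 1 1 digits0
    else digits0
  let digits2 := carryAux digits1 (digits1.length - 1)
  PySem.List.slice digits2 none (some (n + 1))

-- ===== PORT B =====
-- same while-loop control as A's series loop, with one integer accumulator; same fuel guard
def zad4AltLoop : Nat → Int → Int → Int → Int → Int → Int
  | 0, _, _, _, _, total => total
  | fuel + 1, limit, powp, fact, k, total =>
    if fact ≤ limit then
      zad4AltLoop fuel limit powp (fact * k) (k + 1) (total + PySem.Int.floordiv powp (fact * k))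
    else total

-- while total > 0: total, d = divmod(total, 10); digits.append(d); fuel = totality guard
-- (a positive integer has at most total.toNat decimal digits)
def extractDigits : Nat → Int → List Int → List Int
  | 0, _, acc => acc
  | fuel + 1, total, acc =>
    if 0 < total then
      extractDigits fuel (PySem.Int.floordiv total 10) (acc ++ [PySem.Int.mod total 10])
    else acc

def zad4_alt (n : Int) : List Int :=
  if n < 0 then []
  else
    let powp := (10 : Int) ^ (n + 10).toNat
    let limit := (10 : Int) ^ n.toNat
    let total := zad4AltLoop (limit + 2).toNat limit powp 1 1 powp
    let digits := (extractDigits total.toNat total []).reverse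
    PySem.List.slice digits none (some (n + 1))

-- ===== PRECONDITION & SPEC =====
-- For -5 ≤ n ≤ -2 (nonsensical negative digit counts) A returns a nonempty truncated prefix
-- of its zero-padded buffer (an accident of negative slicing, e.g. [1,0] for n = -5) while
-- B returns [], the intended value for a negative count; on every other n they agree.
def D_zad4 (n : Int) : Prop := -5 ≤ n ∧ n ≤ -2
instance (n : Int) : Decidable (D_zad4 n) := by unfold D_zad4; infer_instance

def Spec_zad4 (n : Int) (out : List Int) : Prop := ¬ D_zad4 n → out = zad4_alt n
instance (n : Int) (out : List Int) : Decidable (Spec_zad4 n out) := by unfold Spec_zad4; infer_instance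

def pvDiffWitness_zad4 : Int := (-2)
def pvDiffWitnessOut_zad4 : (List Int) × (List Int) := ([1, 0, 0, 0, 0, 0, 0, 0], [])

-- ===== CLAIM (what is proved, stated in full; the proofs are below) =====
def Claim_unchanged_zad4 : Prop := ∀ (n : Int), Dom_zad4 n → Spec_zad4 n (zad4 n)
def Claim_changed_zad4 : Prop := Dom_zad4 (pvDiffWitness_zad4) ∧ D_zad4 (pvDiffWitness_zad4) ∧ zad4 (pvDiffWitness_zad4) = pvDiffWitnessOut_zad4.1 ∧ zad4_alt (pvDiffWitness_zad4) = pvDiffWitnessOut_zad4.2 ∧ pvDiffWitnessOut_zad4.1 ≠ pvDiffWitnessOut_zad4.2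
def Claim_exact_zad4 : Prop := ∀ (n : Int), Dom_zad4 n → D_zad4 n → zad4 n ≠ zad4_alt n

-- ===== LEMMAS AND PROOFS =====

-- value of a digit array, least-significant-first (valR) and as written (V)
def valR : List Int → Int
  | [] => 0
  | d :: r => d + 10 * valR r

def V (l : List Int) : Int := valR l.reverse

-- the L decimal digits of N, least significant first; the last slot keeps the raw quotient
def digitsLSB : Nat → Int → List Int
  | 0, _ => []
  | 1, N => [N]
  | (m + 2), N => N % 10 :: digitsLSB (m + 1) (N / 10)

-- carry propagation least-significant-first
def carryR : Int → List Int → List Int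
  | _, [] => []
  | c, [d] => [d + c]
  | c, d :: e :: rest => (d + c) % 10 :: carryR ((d + c) / 10) (e :: rest)

theorem valR_append (a b : List Int) : valR (a ++ b) = valR a + 10 ^ a.length * valR b := by
  induction a with
  | nil => simp [valR]
  | cons d t ih => simp [valR, ih, pow_succ]; ring

theorem V_cons (d : Int) (t : List Int) : V (d :: t) = V t + d * 10 ^ t.length := by
  simp [V, valR_append, valR]; ring

theorem valR_replicate_zero (m : Nat) : valR (List.replicate m 0) = 0 := by
  induction m with
  | zero => simp [valR]
  | succ m ih => simp [List.replicate_succ, valR, ih]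

theorem V_init (m : Nat) : V (1 :: List.replicate m 0) = 10 ^ m := by
  rw [V_cons]
  simp [V, List.reverse_replicate, valR_replicate_zero]

theorem V_set (l : List Int) (i : Nat) (x : Int) (h : i < l.length) :
    V (l.set i x) = V l + (x - l[i]!) * 10 ^ (l.length - 1 - i) := by
  induction l generalizing i with
  | nil => simp at h
  | cons d t ih =>
    cases i with
    | zero => rw [List.set_cons_zero, V_cons, V_cons]; simp; ring
    | succ j =>
      simp only [List.length_cons] at h
      rw [List.set_cons_succ, V_cons, V_cons, ih j (by omega)]
      simp only [List.length_set, List.length_cons, List.getElem!_cons_succ]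
      have : t.length + 1 - 1 - (j + 1) = t.length - 1 - j := by omega
      rw [this]; ring

theorem length_longDivAux (a b : Int) (tab : List Int) (i fuel : Nat) :
    (longDivAux a b tab i fuel).length = tab.length := by
  induction fuel generalizing a tab i with
  | zero => rfl
  | succ fuel ih =>
    rw [longDivAux]
    split
    · rw [List.length_set]
    · rw [ih, List.length_set]

theorem longDivAux_val (b : Int) (hb : 0 < b) :
    ∀ (fuel : Nat) (a : Int) (tab : List Int) (i : Nat), fuel + i = tab.length →
    0 ≤ a → a < b →
    V (longDivAux a b tab i fuel) = V tab + a * 10 ^ fuel / b := by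
  intro fuel
  induction fuel with
  | zero =>
    intro a tab i hfi ha0 hab
    show V tab = _
    rw [pow_zero, mul_one, Int.ediv_eq_zero_of_lt ha0 hab, add_zero]
  | succ fuel ih =>
    intro a tab i hfi ha0 hab
    have hi : i < tab.length := by omega
    have hq : PySem.Int.floordiv (a * 10) b = a * 10 / b := PySem.Int.floordiv_eq_ediv_of_pos hb
    have hm : PySem.Int.mod (a * 10) b = a * 10 % b := PySem.Int.mod_eq_emod_of_pos hb
    rw [longDivAux]
    by_cases h2 : PySem.Int.mod (a * 10) b = 0
    · rw [if_pos h2]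
      have h20 : a * 10 % b = 0 := by rw [← hm]; exact h2
      rw [V_set tab i _ hi, hq, pow_succ]
      set X : Int := 10 ^ fuel with hXdef
      set q : Int := a * 10 / b with hqdef
      have ha1 : a * 10 = b * q := by
        rw [hqdef]
        have := Int.ediv_add_emod (a * 10) b; omega
      have hkey : a * (X * 10) = b * (q * X) := by
        have hr : a * (X * 10) = (a * 10) * X := by ring
        rw [hr, ha1]; ring
      have hexp : tab.length - 1 - i = fuel := by omega
      rw [hexp, hkey, Int.mul_ediv_cancel_left _ (by omega : b ≠ 0)]
      ring
    · rw [if_neg h2]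
      have ha2nonneg : (0:Int) ≤ PySem.Int.mod (a * 10) b := by
        rw [hm]; exact Int.emod_nonneg _ (by omega)
      have ha2lt : PySem.Int.mod (a * 10) b < b := by
        rw [hm]; exact Int.emod_lt_of_pos _ hb
      rw [ih _ _ _ (by rw [List.length_set]; omega) ha2nonneg ha2lt]
      rw [V_set tab i _ hi, hq, hm, pow_succ]
      have hexp : tab.length - 1 - i = fuel := by omega
      rw [hexp]
      set X : Int := 10 ^ fuel with hX
      set q : Int := a * 10 / b with hqdef
      set r : Int := a * 10 % b with hrdef
      have hsplit : b * q + r = a * 10 := Int.ediv_add_emod (a * 10) b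
      have hkey : a * (X * 10) = r * X + b * (q * X) := by
        have hr : a * (X * 10) = (a * 10) * X := by ring
        rw [hr, ← hsplit]; ring
      rw [hkey, Int.add_mul_ediv_left _ _ (by omega : b ≠ 0)]
      ring

theorem longDiv_one_val (b : Int) (tab : List Int) (hb : 0 < b) (hlen : 1 < tab.length) :
    V (longDiv 1 b tab) = V tab + 10 ^ (tab.length - 1) / b := by
  rcases (by omega : b = 1 ∨ 1 < b) with hb1 | h1b
  · subst hb1
    rw [longDiv, show tab.length - 1 = (tab.length - 2) + 1 from by omega, longDivAux]
    have hq : PySem.Int.floordiv ((1:Int) * 10) 1 = 10 := by decide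
    have hm : PySem.Int.mod ((1:Int) * 10) 1 = 0 := by decide
    rw [hq, hm, if_pos rfl, V_set tab 1 _ hlen, Int.ediv_one]
    rw [show tab.length - 1 - 1 = tab.length - 2 from by omega, pow_succ]
    ring
  · rw [longDiv, longDivAux_val b hb (tab.length - 1) 1 tab 1 (by omega) (by omega) h1b, one_mul]

theorem length_longDiv (a b : Int) (tab : List Int) : (longDiv a b tab).length = tab.length :=
  length_longDivAux a b tab 1 (tab.length - 1)

theorem length_zad4Loop (fuel : Nat) (limit fact k : Int) (digits : List Int) :
    (zad4Loop fuel limit fact k digits).length = digits.length := by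
  induction fuel generalizing fact k digits with
  | zero => rfl
  | succ fuel ih =>
    rw [zad4Loop]
    split
    · rw [ih, length_longDiv]
    · rfl

theorem loop_corr (fuel : Nat) (limit fact k : Int) (digits : List Int) (total : Int)
    (hlen : 1 < digits.length) (hfk : 0 < fact) (hk : 0 < k) (hV : V digits = total) :
    V (zad4Loop fuel limit fact k digits) =
      zad4AltLoop fuel limit ((10 : Int) ^ (digits.length - 1)) fact k total := by
  induction fuel generalizing fact k digits total with
  | zero => exact hV
  | succ fuel ih =>
    rw [zad4Loop, zad4AltLoop]
    split
    · have hpos : (0:Int) < fact * k := by positivity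
      have hlen' : 1 < (longDiv 1 (fact * k) digits).length := by rw [length_longDiv]; exact hlen
      have hV' : V (longDiv 1 (fact * k) digits) =
          total + PySem.Int.floordiv ((10 : Int) ^ (digits.length - 1)) (fact * k) := by
        rw [longDiv_one_val _ _ hpos hlen, hV, PySem.Int.floordiv_eq_ediv_of_pos hpos]
      have := ih (fact * k) (k + 1) (longDiv 1 (fact * k) digits) _ hlen' hpos (by omega) hV'
      rw [length_longDiv] at this
      exact this
    · exact hV

-- divisor-monotonicity of ediv on nonnegative numerators
theorem ediv_le_ediv_div (N b c : Int) (hN : 0 ≤ N) (hb : 0 < b) (hbc : b ≤ c) :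
    N / c ≤ N / b := by
  rw [Int.le_ediv_iff_mul_le hb]
  calc N / c * b ≤ N / c * c := by
        have : 0 ≤ N / c := Int.ediv_nonneg hN (by omega)
        exact mul_le_mul_of_nonneg_left hbc this
    _ ≤ N := Int.ediv_mul_le N (by omega)

theorem loop_bound (fuel : Nat) (limit powp fact k total : Int) (hp : 0 < powp)
    (hf : 1 ≤ fact) (hk : 1 ≤ k)
    (hinv : (k = 1 ∧ fact = 1 ∧ total = powp) ∨ (2 ≤ k ∧ total + powp / fact ≤ 3 * powp))
    (hlow : powp ≤ total) :
    powp ≤ zad4AltLoop fuel limit powp fact k total ∧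
      zad4AltLoop fuel limit powp fact k total ≤ 3 * powp := by
  induction fuel generalizing fact k total with
  | zero =>
    rw [zad4AltLoop]
    refine ⟨hlow, ?_⟩
    rcases hinv with ⟨_, _, ht⟩ | ⟨_, hbd⟩
    · omega
    · have : 0 ≤ powp / fact := Int.ediv_nonneg (by omega) (by omega)
      omega
  | succ fuel ih =>
    rw [zad4AltLoop]
    split
    · have hfk : (0:Int) < fact * k := by positivity
      have hdiv : PySem.Int.floordiv powp (fact * k) = powp / (fact * k) :=
        PySem.Int.floordiv_eq_ediv_of_pos hfk
      have hterm0 : 0 ≤ powp / (fact * k) := Int.ediv_nonneg (by omega) (by omega)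
      apply ih (fact * k) (k + 1) _ (by nlinarith) (by omega)
      · rcases hinv with ⟨hk1, hf1, ht⟩ | ⟨hk2, hbd⟩
        · right
          subst hk1; subst hf1; subst ht
          refine ⟨by omega, ?_⟩
          rw [hdiv]
          simp only [one_mul, Int.ediv_one]
          omega
        · right
          refine ⟨by omega, ?_⟩
          rw [hdiv]
          have h2k : fact * 2 ≤ fact * k := by nlinarith
          have h1 : powp / (fact * k) ≤ powp / (fact * 2) :=
            ediv_le_ediv_div powp (fact * 2) (fact * k) (by omega) (by nlinarith) h2k
          have h2 : powp / (fact * 2) = powp / fact / 2 :=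
            (Int.ediv_ediv_of_nonneg (by omega : (0:Int) ≤ fact)).symm
          have h3 : 0 ≤ powp / fact := Int.ediv_nonneg (by omega) (by omega)
          omega
      · rw [hdiv]; omega
    · refine ⟨hlow, ?_⟩
      rcases hinv with ⟨_, _, ht⟩ | ⟨_, hbd⟩
      · omega
      · have : 0 ≤ powp / fact := Int.ediv_nonneg (by omega) (by omega)
        omega

theorem carryR_eq (rl : List Int) : ∀ c, rl ≠ [] →
    carryR c rl = digitsLSB rl.length (valR rl + c) := by
  induction rl with
  | nil => intro c h; exact absurd rfl h
  | cons d tl ih =>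
    intro c _
    cases tl with
    | nil => simp [carryR, valR, digitsLSB]
    | cons e rest =>
      rw [carryR, ih ((d + c) / 10) (by simp)]
      show _ = digitsLSB (rest.length + 1 + 1) _
      rw [digitsLSB]
      have h1 : (d + c) % 10 = (valR (d :: e :: rest) + c) % 10 := by
        simp only [valR]; omega
      have h2 : valR (e :: rest) + (d + c) / 10 = (valR (d :: e :: rest) + c) / 10 := by
        simp only [valR]; omega
      rw [h1, h2]
      simp

theorem carryR_shift (c d : Int) (l : List Int) : carryR c (d :: l) = carryR 0 ((d + c) :: l) := by
  cases l with
  | nil => simp [carryR]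
  | cons e rest => simp [carryR]

theorem carryAux_bridge : ∀ (m : Nat) (pre suf : List Int), pre.length = m + 1 →
    carryAux (pre ++ suf) m = (carryR 0 pre.reverse).reverse ++ suf := by
  intro m
  induction m with
  | zero =>
    intro pre suf hlen
    match pre, hlen with
    | [x], _ => simp [carryAux, carryR]
  | succ j ih =>
    intro pre suf hlen
    rcases hpr : pre.reverse with _ | ⟨y, tl⟩
    · have := congrArg List.length hpr; simp [hlen] at this
    · rcases tl with _ | ⟨x, rest⟩
      · have := congrArg List.length hpr; simp [hlen] at this
      · have hpre : pre = rest.reverse ++ [x, y] := by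
          rw [← List.reverse_reverse pre, hpr]; simp
        have hbs : rest.reverse.length = j := by
          have := congrArg List.length hpr
          simp [hlen] at this
          simp [this]
        subst hpre
        have hflat : (rest.reverse ++ [x, y]) ++ suf = rest.reverse ++ (x :: y :: suf) := by simp
        rw [hflat, carryAux]
        have hgy : (rest.reverse ++ x :: y :: suf)[j + 1]! = y := by
          rw [List.getElem!_eq_getElem?_getD, List.getElem?_append_right (by omega), hbs]
          simp
        have hgx : (rest.reverse ++ x :: y :: suf)[j]! = x := by
          rw [List.getElem!_eq_getElem?_getD, List.getElem?_append_right (by omega), hbs]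
          simp
        rw [hgy, hgx]
        have hset1 : (rest.reverse ++ x :: y :: suf).set j (x + PySem.Int.floordiv y 10) =
            rest.reverse ++ (x + PySem.Int.floordiv y 10) :: y :: suf := by
          rw [List.set_append_right _ _ (by omega), hbs]
          simp
        rw [hset1]
        have hset2 : (rest.reverse ++ (x + PySem.Int.floordiv y 10) :: y :: suf).set (j + 1)
            (PySem.Int.mod y 10) =
            rest.reverse ++ (x + PySem.Int.floordiv y 10) :: (PySem.Int.mod y 10) :: suf := by
          rw [List.set_append_right _ _ (by omega), hbs]
          simp
        rw [hset2]
        have hflat2 : rest.reverse ++ (x + PySem.Int.floordiv y 10) :: (PySem.Int.mod y 10) :: suf =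
            (rest.reverse ++ [x + PySem.Int.floordiv y 10]) ++ ((PySem.Int.mod y 10) :: suf) := by
          simp
        rw [hflat2, ih (rest.reverse ++ [x + PySem.Int.floordiv y 10]) _ (by simp [hbs])]
        have hq : PySem.Int.floordiv y 10 = y / 10 :=
          PySem.Int.floordiv_eq_ediv_of_pos (by omega)
        have hmm : PySem.Int.mod y 10 = y % 10 :=
          PySem.Int.mod_eq_emod_of_pos (by omega)
        have hrev1 : (rest.reverse ++ [x + PySem.Int.floordiv y 10]).reverse =
            (x + y / 10) :: rest := by rw [hq]; simp
        rw [hrev1, hmm]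
        rw [show carryR 0 (y :: x :: rest) = (y % 10) :: carryR (y / 10) (x :: rest) by
          simp [carryR]]
        rw [carryR_shift (y / 10) x rest]
        simp

theorem carry_final (digits : List Int) (h : digits ≠ []) :
    carryAux digits (digits.length - 1) = (digitsLSB digits.length (V digits)).reverse := by
  have hlen : digits.length = (digits.length - 1) + 1 := by
    cases digits
    · exact absurd rfl h
    · simp
  have hb := carryAux_bridge (digits.length - 1) digits [] hlen
  rw [List.append_nil] at hb
  rw [hb, carryR_eq digits.reverse 0 (by simpa using h)]
  simp [V]

theorem extract_zero (fuel : Nat) (acc : List Int) : extractDigits fuel 0 acc = acc := by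
  cases fuel with
  | zero => rfl
  | succ fuel => rw [extractDigits, if_neg (by omega)]

theorem extract_eq : ∀ (m : Nat) (N : Int) (acc : List Int) (fuel : Nat), m + 1 ≤ fuel →
    10 ^ m ≤ N → N < 10 ^ (m + 1) → extractDigits fuel N acc = acc ++ digitsLSB (m + 1) N := by
  intro m
  induction m with
  | zero =>
    intro N acc fuel hfuel h1 h2
    simp only [pow_zero] at h1 h2
    obtain ⟨fuel', rfl⟩ : ∃ f, fuel = f + 1 := ⟨fuel - 1, by omega⟩
    rw [extractDigits, if_pos (by omega : (0:Int) < N)]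
    have hq : PySem.Int.floordiv N 10 = 0 := by
      rw [PySem.Int.floordiv_eq_ediv_of_pos (by omega : (0:Int) < 10)]
      exact Int.ediv_eq_zero_of_lt (by omega) (by omega)
    have hm : PySem.Int.mod N 10 = N := by
      rw [PySem.Int.mod_eq_emod_of_pos (by omega : (0:Int) < 10)]; omega
    rw [hq, hm, extract_zero]
    simp [digitsLSB]
  | succ m ih =>
    intro N acc fuel hfuel h1 h2
    have hpow : (0:Int) < 10 ^ (m + 1) := by positivity
    have hNpos : (0:Int) < N := by omega
    obtain ⟨fuel', rfl⟩ : ∃ f, fuel = f + 1 := ⟨fuel - 1, by omega⟩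
    rw [extractDigits, if_pos hNpos]
    have hq : PySem.Int.floordiv N 10 = N / 10 :=
      PySem.Int.floordiv_eq_ediv_of_pos (by omega)
    have hmm : PySem.Int.mod N 10 = N % 10 :=
      PySem.Int.mod_eq_emod_of_pos (by omega)
    have hlo : 10 ^ m ≤ N / 10 := by
      rw [Int.le_ediv_iff_mul_le (by omega : (0:Int) < 10)]
      calc (10:Int) ^ m * 10 = 10 ^ (m + 1) := (pow_succ 10 m).symm
        _ ≤ N := h1
    have hhi : N / 10 < 10 ^ (m + 1) := by
      rw [Int.ediv_lt_iff_lt_mul (by omega : (0:Int) < 10)]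
      calc N < 10 ^ (m + 1 + 1) := h2
        _ = 10 ^ (m + 1) * 10 := pow_succ 10 (m + 1)
    rw [hq, hmm, ih (N / 10) (acc ++ [N % 10]) fuel' (by omega) hlo hhi]
    rw [List.append_assoc]
    rfl

-- setting a slot to the value it already holds (getElem! convention) is the identity
theorem set_getElem!_self (l : List Int) (i : Nat) : l.set i (l[i]!) = l := by
  by_cases h : i < l.length
  · rw [List.getElem!_eq_getElem?_getD, List.getElem?_eq_getElem h]
    simp
  · rw [List.set_eq_of_length_le (by omega)]

-- every slot of index ≥ 1 of A's initial buffer is 0 (out-of-range reads give default 0)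
theorem ones_zeros (m k : Nat) (hk : 1 ≤ k) : ((1:Int) :: List.replicate m 0)[k]! = 0 := by
  cases k with
  | zero => omega
  | succ k' =>
    rw [List.getElem!_cons_succ, List.getElem!_eq_getElem?_getD, List.getElem?_replicate]
    split <;> rfl

-- the carry pass is the identity on a buffer whose slots of index ≥ 1 are all 0
theorem carryAux_zeros : ∀ (i : Nat) (digits : List Int),
    (∀ k : Nat, 1 ≤ k → digits[k]! = 0) → carryAux digits i = digits := by
  intro i
  induction i with
  | zero => intro digits _; rfl
  | succ j ih =>
    intro digits hz
    rw [carryAux, hz (j + 1) (by omega)]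
    rw [show PySem.Int.floordiv 0 10 = 0 from by decide,
      show PySem.Int.mod 0 10 = 0 from by decide, add_zero, set_getElem!_self,
      show (0:Int) = digits[j + 1]! from (hz (j + 1) (by omega)).symm, set_getElem!_self]
    exact ih digits hz

-- xs[:b] is empty when b is negative and |b| covers the whole list
theorem slice_neg_empty (xs : List Int) (b : Int) (hb : b < 0) (hlen : (xs.length : Int) ≤ -b) :
    PySem.List.slice xs none (some b) = [] := by
  have hk : b = -(((-b).toNat : Nat) : Int) := by omega
  rw [hk]
  rw [PySem.List.slice_to_neg_natCast xs (-b).toNat (by omega)]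
  rw [show xs.length - (-b).toNat = 0 from by omega]
  rfl

-- ===== VERDICT (by name: the statement is the Claim_ definition above) =====
theorem zad4_spec : Claim_unchanged_zad4 := by
  unfold Claim_unchanged_zad4
  intro n _
  unfold Spec_zad4
  intro hnd
  unfold D_zad4 at hnd
  by_cases hpre : 0 ≤ n
  case neg =>
    -- negative n outside D_: the loop never runs, the carry pass is the identity and the
    -- negative slice is empty; B returns [] by its guard
    have hlt : n < 0 := by omega
    have hB : zad4_alt n = [] := by unfold zad4_alt; rw [if_pos hlt]
    unfold zad4
    simp only [if_neg hpre]
    rw [carryAux_zeros _ _ (fun k hk => ones_zeros _ k hk), hB]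
    rcases (by omega : n + 1 = 0 ∨ n + 1 < 0) with h0 | hneg
    · rw [h0, PySem.List.slice_to _ (by omega)]
      rfl
    · apply slice_neg_empty _ _ hneg
      rw [show ((1:Int) :: List.replicate (n + 10).toNat 0).length = (n + 10).toNat + 1 from
        by simp]
      push_cast
      omega
  case pos =>
    unfold zad4 zad4_alt
    have hnneg : ¬ n < 0 := by omega
    simp only [if_pos hpre, if_neg hnneg]
    set m := (n + 10).toNat with hmdef
    have hm : 10 ≤ m := by omega
    have hlen0 : ((1:Int) :: List.replicate m (0:Int)).length = m + 1 := by simp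
    have hpowp : (0:Int) < 10 ^ m := by positivity
    congr 1
    rw [carry_final _ (by
      intro hcontra
      have := congrArg List.length hcontra
      rw [length_zad4Loop, hlen0] at this
      simp at this)]
    rw [length_zad4Loop, hlen0]
    rw [loop_corr _ _ _ _ _ ((10:Int) ^ m) (by rw [hlen0]; omega) (by omega) (by omega)
      (V_init m)]
    rw [hlen0]
    simp only [Nat.add_sub_cancel]
    have hbounds := loop_bound (((10:Int) ^ n.toNat + 2).toNat) ((10:Int) ^ n.toNat)
      ((10:Int) ^ m) 1 1 ((10:Int) ^ m) hpowp (by omega) (by omega)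
      (Or.inl ⟨rfl, rfl, rfl⟩) le_rfl
    have hfuel : m + 1 ≤
        (zad4AltLoop (((10:Int) ^ n.toNat + 2).toNat) ((10:Int) ^ n.toNat)
          ((10:Int) ^ m) 1 1 ((10:Int) ^ m)).toNat := by
      have hbig : ((m : Int)) + 1 ≤ 10 ^ m := by
        have h1 : m < 10 ^ m := Nat.lt_pow_self (by omega)
        have : ((m : Int)) < ((10 ^ m : Nat) : Int) := by exact_mod_cast h1
        push_cast at this
        omega
      have := hbounds.1
      omega
    rw [extract_eq m _ [] _ hfuel hbounds.1 (by
      have := hbounds.2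
      have h10 : (10:Int) ^ (m + 1) = 10 ^ m * 10 := pow_succ 10 m
      omega)]
    simp

theorem zad4_changed : Claim_changed_zad4 := by unfold Claim_changed_zad4; decide

theorem zad4_tight : Claim_exact_zad4 := by
  unfold Claim_exact_zad4 D_zad4
  intro n _ hd
  have : n = -5 ∨ n = -4 ∨ n = -3 ∨ n = -2 := by omega
  rcases this with h | h | h | h <;> subst h <;> decide
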